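-- pv_equiv track=rewrite | github.com/Julius232/Chess-Engine | src/main/resources/py/BitBoard.py | print_chessboard_from_number
-- ===== SOURCE A (Python) =====
-- def print_chessboard_from_number(number, base):
--     try:
--         number = int(number, base)
--         if number < 0:
--             number = number + (1 << 64)  # Convert to two's complement
--         binary_string = bin(number & 0xFFFFFFFFFFFFFFFF)[2:].zfill(64)
--         chessboard = [["0" for _ in range(8)] for _ in range(8)]
--         for i, bit in enumerate(binary_string):
--             if bit == "1":
--                 rank = i // 8
--                 file = 7 - (i % 8)
--                 chessboard[rank][file] = "1"
--         return chessboard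
--     except ValueError:
--         return [["Invalid" for _ in range(8)] for _ in range(8)]
-- ===== SOURCE B (Python) =====
-- def print_chessboard_from_number(number, base):
--     try:
--         n = int(number, base)
--     except ValueError:
--         return [["Invalid"] * 8 for _ in range(8)]
--     if n < 0:
--         n += 1 << 64  # two's complement
--     return [["1" if (n >> (56 - 8 * rank + file)) & 1 else "0" for file in range(8)]
--             for rank in range(8)]
-- ===== Notes on version B (the rewrite author's own statement) =====
-- stated objective: idiomatic
-- what changed: B drops A's binary-string rendering (bin/zfill/enumerate with sparse updates into a pre-filled grid) and builds the grid directly with one integer bit test per cell in a rank-major double loop.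
import Mathlib
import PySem

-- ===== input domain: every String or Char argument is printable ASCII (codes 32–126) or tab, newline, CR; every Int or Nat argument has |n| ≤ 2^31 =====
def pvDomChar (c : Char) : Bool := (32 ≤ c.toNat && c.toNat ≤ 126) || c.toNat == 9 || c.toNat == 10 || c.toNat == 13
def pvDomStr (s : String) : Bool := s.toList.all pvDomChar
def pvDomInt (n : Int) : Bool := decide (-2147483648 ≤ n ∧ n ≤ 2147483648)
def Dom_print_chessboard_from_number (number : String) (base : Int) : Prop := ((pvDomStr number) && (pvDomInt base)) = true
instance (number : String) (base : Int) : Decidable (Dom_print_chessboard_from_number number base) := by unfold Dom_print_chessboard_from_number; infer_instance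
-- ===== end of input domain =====

-- B replaces A's binary-string rendering + sparse fold of cell updates by direct
-- per-cell integer bit tests (idiomatic; same behaviour, including the "Invalid" grid).

-- ===== PORT A =====
-- [["0" for _ in range(8)] for _ in range(8)]
def pvGrid0 : List (List String) :=
  (List.range 8).map (fun _ => (List.range 8).map (fun _ => "0"))

-- chessboard[rank][file] = "1"  (list-of-lists store; used with rank,file in [0,7], where toNat is exact)
def pvStep (cb : List (List String)) (p : Int × Char) : List (List String) :=
  if p.2 = '1' then
    let rank := PySem.Int.floordiv p.1 8
    let file := 7 - PySem.Int.mod p.1 8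
    cb.set rank.toNat ((cb.getD rank.toNat []).set file.toNat "1")
  else cb

def print_chessboard_from_number (number : String) (base : Int) : List (List String) :=
  match PySem.Int.ofStrBase? number base with                     -- int(number, base); ValueError ↦ none
  | none => (List.range 8).map (fun _ => (List.range 8).map (fun _ => "Invalid"))
  | some n0 =>
    let number := if n0 < 0 then n0 + ((1:Int) <<< 64) else n0
    -- bin(x)[2:].zfill(64): bin = toBinChars0b, [2:] = drop 2; '&' is PySem.Int.band (Python-exact)
    let binary_string : List Char :=
      PySem.Chars.zfill ((PySem.Int.toBinChars0b (PySem.Int.band number 0xFFFFFFFFFFFFFFFF)).drop 2) 64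
    (PySem.List.enumerate binary_string 0).foldl pvStep pvGrid0

-- ===== PORT B =====
def print_chessboard_from_number_alt (number : String) (base : Int) : List (List String) :=
  match PySem.Int.ofStrBase? number base with                     -- int(number, base); ValueError ↦ none
  | none => (List.range 8).map (fun _ => List.replicate 8 "Invalid")   -- ["Invalid"] * 8
  | some n0 =>
    let n := if n0 < 0 then n0 + ((1:Int) <<< 64) else n0
    (List.range 8).map (fun rank =>
      (List.range 8).map (fun file =>
        if PySem.Int.band (n >>> (56 - 8 * rank + file : Nat)) 1 ≠ 0 then "1" else "0"))

-- ===== PRECONDITION & SPEC =====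
def Spec_print_chessboard_from_number (number : String) (base : Int) (out : List (List String)) : Prop := out = print_chessboard_from_number_alt number base
instance (number : String) (base : Int) (out : List (List String)) : Decidable (Spec_print_chessboard_from_number number base out) := by unfold Spec_print_chessboard_from_number; infer_instance

-- ===== CLAIM (what is proved, stated in full; the proofs are below) =====
def Claim_equal_print_chessboard_from_number : Prop := ∀ (number : String) (base : Int), Dom_print_chessboard_from_number number base → Spec_print_chessboard_from_number number base (print_chessboard_from_number number base)

-- ===== LEMMAS AND PROOFS =====

-- Nat.toDigits 2, as a plain structural recursion.
def pvRep (n : Nat) : List Char :=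
  if _h : n < 2 then [Nat.digitChar n] else pvRep (n / 2) ++ [Nat.digitChar (n % 2)]
decreasing_by exact Nat.div_lt_self (by omega) (by omega)

theorem pvToDigitsCore_eq (f : Nat) : ∀ (n : Nat) (ds : List Char), n < f →
    Nat.toDigitsCore 2 f n ds = pvRep n ++ ds := by
  induction f with
  | zero => intro n ds h; omega
  | succ f ih =>
    intro n ds h
    rw [Nat.toDigitsCore]
    by_cases h2 : n < 2
    · have hz : n / 2 = 0 := by omega
      have hm : n % 2 = n := by omega
      simp [hz, hm, pvRep, h2]
    · have hz : ¬ (n / 2 = 0) := by omega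
      simp only [hz, if_false]
      rw [ih (n / 2) _ (by omega)]
      conv_rhs => rw [pvRep]
      simp only [h2, dif_neg, not_false_iff, List.append_assoc, List.singleton_append]

theorem pvToDigits_two (n : Nat) : Nat.toDigits 2 n = pvRep n := by
  rw [Nat.toDigits, pvToDigitsCore_eq (n + 1) n [] (by omega), List.append_nil]

-- the top k bits of n, most significant first
def pvBitsM : Nat → Nat → List Char
  | 0, _ => []
  | k + 1, n => pvBitsM k (n / 2) ++ [Nat.digitChar (n % 2)]

theorem pvBitsM_zero (k : Nat) : pvBitsM k 0 = List.replicate k '0' := by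
  induction k with
  | zero => rfl
  | succ k ih => rw [pvBitsM]; simp [ih, List.replicate_succ']; rfl

theorem pvRep_pad : ∀ (k n : Nat), 1 ≤ k → n < 2 ^ k →
    List.replicate (k - (pvRep n).length) '0' ++ pvRep n = pvBitsM k n := by
  intro k
  induction k with
  | zero => omega
  | succ k ih =>
    intro n _ hn
    by_cases h2 : n < 2
    · rw [pvRep]
      simp only [h2, dif_pos]
      have hz : n / 2 = 0 := by omega
      have hm : n % 2 = n := by omega
      rw [pvBitsM, hz, pvBitsM_zero, hm]
      simp
    · have h1 : 1 ≤ k := by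
        by_contra hk
        have : k = 0 := by omega
        subst this; omega
      rw [pvRep]
      simp only [h2, dif_neg, not_false_iff]
      have hlen : ((pvRep (n / 2) ++ [Nat.digitChar (n % 2)])).length = (pvRep (n / 2)).length + 1 := by simp
      rw [hlen]
      have hsub : k + 1 - ((pvRep (n / 2)).length + 1) = k - (pvRep (n / 2)).length := by omega
      rw [hsub, pvBitsM, ← ih (n / 2) h1 (by omega), List.append_assoc]

theorem pvBitsM_eq_map : ∀ (k n : Nat),
    pvBitsM k n = (List.range k).map (fun i => Nat.digitChar (n / 2 ^ (k - 1 - i) % 2)) := by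
  intro k
  induction k with
  | zero => intro n; rfl
  | succ k ih =>
    intro n
    rw [pvBitsM, ih (n / 2), List.range_succ]
    simp only [List.map_append, List.map_cons, List.map_nil]
    congr 1
    · apply List.map_congr_left
      intro i hi
      have hik : i < k := List.mem_range.mp hi
      have hexp : k + 1 - 1 - i = (k - 1 - i) + 1 := by omega
      rw [hexp, pow_succ, Nat.div_div_eq_div_mul]
      ring_nf
    · simp

theorem pvRep_chars (n : Nat) : ∀ c ∈ pvRep n, c = '0' ∨ c = '1' := by
  induction n using pvRep.induct with
  | case1 n h =>
    intro c hc
    rw [pvRep] at hc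
    simp only [h, dif_pos, List.mem_singleton] at hc
    subst hc
    interval_cases n
    · left; rfl
    · right; rfl
  | case2 n h ih =>
    intro c hc
    rw [pvRep] at hc
    simp only [h, dif_neg, not_false_iff, List.mem_append, List.mem_singleton] at hc
    rcases hc with hc | hc
    · exact ih c hc
    · subst hc
      rcases Nat.mod_two_eq_zero_or_one n with hm | hm <;> rw [hm]
      · left; rfl
      · right; rfl

theorem pvZfill_eq (cs : List Char) (h : ∀ c ∈ cs, c = '0' ∨ c = '1') :
    PySem.Chars.zfill cs 64 = List.replicate (64 - cs.length) '0' ++ cs := by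
  rw [PySem.Chars.zfill.eq_def]
  by_cases hle : (64 : Int) ≤ (cs.length : Int)
  · have : 64 - cs.length = 0 := by omega
    simp [hle, this]
  · simp only [hle, if_false]
    match cs with
    | [] => simp
    | c :: rest =>
      have hc := h c (List.mem_cons_self ..)
      have hns : ¬ (c = '+' ∨ c = '-') := by
        rcases hc with hc | hc <;> subst hc <;> decide
      simp only [hns, if_false]
      have : Int.toNat 64 = 64 := rfl
      rw [this]

-- x & 0xFFFFFFFFFFFFFFFF  =  x % 2**64
theorem pvBand_mask (a : Int) :
    PySem.Int.band a 0xFFFFFFFFFFFFFFFF = a % 18446744073709551616 := by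
  rw [PySem.Int.band]
  have hm : ((0xFFFFFFFFFFFFFFFF : Int)).toNat = 2 ^ 64 - 1 := by rfl
  by_cases ha : 0 ≤ a
  · simp only [ha, if_pos, (by norm_num : (0:Int) ≤ 0xFFFFFFFFFFFFFFFF)]
    rw [hm, Nat.and_two_pow_sub_one_eq_mod]
    have h64 : (2:Nat) ^ 64 = 18446744073709551616 := by norm_num
    rw [h64]
    omega
  · simp only [ha, if_false, if_true, (by norm_num : (0:Int) ≤ 0xFFFFFFFFFFFFFFFF)]
    rw [hm, Nat.and_comm, Nat.and_two_pow_sub_one_eq_mod]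
    have h64 : (2:Nat) ^ 64 = 18446744073709551616 := by norm_num
    rw [h64]
    omega

-- (a >> k) & 1  =  ((a % 2**64) / 2**k) % 2   for k < 64
theorem pvShift_bit (a : Int) (k : Nat) (hk : k < 64) :
    PySem.Int.band (a >>> k) 1 = ((a % 18446744073709551616) / 2 ^ k) % 2 := by
  rw [PySem.Int.band_one, PySem.Int.mod_eq_emod_of_pos (by norm_num), Int.shiftRight_eq_div_pow]
  set q := a / 18446744073709551616 with hq
  have hdec : a = a % 18446744073709551616 + (q * 2 ^ (64 - k)) * 2 ^ k := by
    have h1 : (2:Int) ^ (64 - k) * 2 ^ k = 2 ^ 64 := by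
      rw [← pow_add]; congr 1; omega
    have h2 : q * 2 ^ (64 - k) * 2 ^ k = q * 2 ^ 64 := by rw [mul_assoc, h1]
    rw [h2]
    have := Int.ediv_add_emod a 18446744073709551616
    have h3 : (2:Int) ^ 64 = 18446744073709551616 := by norm_num
    rw [h3]; omega
  calc a / (2 ^ k : Nat) % 2
      = (a % 18446744073709551616 + q * 2 ^ (64 - k) * 2 ^ k) / (2 ^ k : Int) % 2 := by
        rw [← hdec]; norm_num
    _ = (a % 18446744073709551616 / 2 ^ k + q * 2 ^ (64 - k)) % 2 := by
        rw [Int.add_mul_ediv_right _ _ (by positivity)]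
    _ = (a % 18446744073709551616 / 2 ^ k + (q * 2 ^ (63 - k)) * 2) % 2 := by
        congr 2
        have : 64 - k = (63 - k) + 1 := by omega
        rw [this, pow_succ]; ring
    _ = (a % 18446744073709551616 / 2 ^ k) % 2 := by
        rw [mul_comm (q * 2 ^ (63 - k)) 2, Int.add_mul_emod_self_left]

def pvGetCell (g : List (List String)) (r f : Nat) : String := (g.getD r []).getD f ""

theorem pvGetCell_set_self (g : List (List String)) (r f : Nat) (hr : r < g.length)
    (hf : f < (g.getD r []).length) :
    pvGetCell (g.set r ((g.getD r []).set f "1")) r f = "1" := by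
  unfold pvGetCell
  rw [List.getD_eq_getElem g [] hr] at hf
  simp [List.getD_eq_getElem?_getD, List.getElem?_set, hr, hf]

theorem pvGetCell_set_ne (g : List (List String)) (r' f' r f : Nat) (h : r' ≠ r ∨ f' ≠ f) :
    pvGetCell (g.set r' ((g.getD r' []).set f' "1")) r f = pvGetCell g r f := by
  unfold pvGetCell
  rcases h with h | h
  · simp [List.getD_eq_getElem?_getD, List.getElem?_set, h]
  · by_cases hr : r' = r
    · subst hr
      by_cases hlt : r' < g.length
      · simp [List.getD_eq_getElem?_getD, List.getElem?_set, hlt, h]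
      · simp [List.getD_eq_getElem?_getD, List.getElem?_set, hlt]
    · simp [List.getD_eq_getElem?_getD, List.getElem?_set, hr]

theorem pvStep_bounds (p : Int × Char) (hp : 0 ≤ p.1 ∧ p.1 < 64) :
    (PySem.Int.floordiv p.1 8).toNat < 8 ∧ (7 - PySem.Int.mod p.1 8).toNat < 8
      ∧ 0 ≤ 7 - PySem.Int.mod p.1 8 := by
  rw [PySem.Int.floordiv_eq_ediv_of_pos (by norm_num), PySem.Int.mod_eq_emod_of_pos (by norm_num)]
  omega

theorem pvFold_shape : ∀ (l : List (Int × Char)) (g : List (List String)),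
    g.length = 8 → (∀ row ∈ g, row.length = 8) → (∀ p ∈ l, 0 ≤ p.1 ∧ p.1 < 64) →
    (l.foldl pvStep g).length = 8 ∧ (∀ row ∈ l.foldl pvStep g, row.length = 8) := by
  intro l
  induction l with
  | nil => intro g hg hrow _; exact ⟨hg, hrow⟩
  | cons p l ih =>
    intro g hg hrow hl
    rw [List.foldl_cons]
    have hp := hl p (List.mem_cons_self ..)
    have hb := pvStep_bounds p hp
    apply ih _ ?_ ?_ (fun q hq => hl q (List.mem_cons_of_mem _ hq))
    · unfold pvStep; split <;> simp [hg]
    · unfold pvStep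
      split
      · intro row hrow'
        rcases List.mem_or_eq_of_mem_set hrow' with hmem | heq
        · exact hrow row hmem
        · subst heq
          rw [List.length_set]
          have hlt : (PySem.Int.floordiv p.1 8).toNat < g.length := by omega
          rw [List.getD_eq_getElem g [] hlt]
          exact hrow _ (List.getElem_mem hlt)
      · exact hrow

theorem pvFold_cell : ∀ (l : List (Int × Char)) (g : List (List String)) (r f : Nat),
    r < 8 → f < 8 → g.length = 8 → (∀ row ∈ g, row.length = 8) →
    (∀ p ∈ l, 0 ≤ p.1 ∧ p.1 < 64) →
    pvGetCell (l.foldl pvStep g) r f =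
      if l.any (fun p => p.2 == '1' && (PySem.Int.floordiv p.1 8).toNat == r
          && (7 - PySem.Int.mod p.1 8).toNat == f)
      then "1" else pvGetCell g r f := by
  intro l
  induction l with
  | nil =>
    intro g r f _ _ _ _ _
    simp only [List.foldl_nil, List.any_nil, Bool.false_eq_true, if_false]
  | cons p l ih =>
    intro g r f hr hf hg hrow hl
    have hp := hl p (List.mem_cons_self ..)
    have hb := pvStep_bounds p hp
    have hg' := pvFold_shape [p] g hg hrow (by intro q hq; simp at hq; subst hq; exact hp)
    rw [List.foldl_cons] at hg' ⊢
    simp only [List.foldl_nil] at hg'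
    rw [ih (pvStep g p) r f hr hf hg'.1 hg'.2 (fun q hq => hl q (List.mem_cons_of_mem _ hq))]
    rw [List.any_cons]
    simp only [PySem.Int.floordiv_eq_ediv_of_pos (show (0:Int) < 8 by norm_num),
               PySem.Int.mod_eq_emod_of_pos (show (0:Int) < 8 by norm_num)]
    by_cases hany : (l.any fun q => q.2 == '1' && (q.1 / 8).toNat == r
        && (7 - q.1 % 8).toNat == f) = true
    · rw [if_pos hany, hany, Bool.or_true, if_pos rfl]
    · have hanyf : (l.any fun q => q.2 == '1' && (q.1 / 8).toNat == r
          && (7 - q.1 % 8).toNat == f) = false := by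
        simp only [Bool.not_eq_true] at hany; exact hany
      rw [if_neg hany, hanyf, Bool.or_false]
      rw [PySem.Int.floordiv_eq_ediv_of_pos (show (0:Int) < 8 by norm_num),
          PySem.Int.mod_eq_emod_of_pos (show (0:Int) < 8 by norm_num)] at hb
      by_cases hbit : p.2 = '1'
      · by_cases hcell : (p.1 / 8).toNat = r ∧ (7 - p.1 % 8).toNat = f
        · obtain ⟨h1, h2⟩ := hcell
          have hpred : (p.2 == '1' && ((p.1 / 8).toNat == r)
              && ((7 - p.1 % 8).toNat == f)) = true := by
            simp [hbit, h1, h2]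
          rw [hpred, if_pos rfl]
          unfold pvStep
          rw [if_pos hbit]
          simp only [PySem.Int.floordiv_eq_ediv_of_pos (show (0:Int) < 8 by norm_num),
                     PySem.Int.mod_eq_emod_of_pos (show (0:Int) < 8 by norm_num)]
          simp only [h1, h2]
          have hlt : r < g.length := by omega
          rw [pvGetCell_set_self g r f hlt]
          rw [List.getD_eq_getElem g [] hlt, hrow _ (List.getElem_mem hlt)]
          omega
        · have hpred : (p.2 == '1' && ((p.1 / 8).toNat == r)
              && ((7 - p.1 % 8).toNat == f)) = false := by
            rcases (not_and_or.mp hcell) with h | h <;> simp [h]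
          rw [hpred, if_neg (by simp)]
          unfold pvStep
          rw [if_pos hbit]
          simp only [PySem.Int.floordiv_eq_ediv_of_pos (show (0:Int) < 8 by norm_num),
                     PySem.Int.mod_eq_emod_of_pos (show (0:Int) < 8 by norm_num)]
          apply pvGetCell_set_ne
          exact not_and_or.mp hcell
      · have hpred : (p.2 == '1' && ((p.1 / 8).toNat == r)
            && ((7 - p.1 % 8).toNat == f)) = false := by simp [hbit]
        rw [hpred, if_neg (by simp)]
        unfold pvStep
        rw [if_neg hbit]

theorem pvGetElem_eq_getCell (g : List (List String)) (r f : Nat) (hr : r < g.length)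
    (hf : f < g[r].length) : g[r][f] = pvGetCell g r f := by
  unfold pvGetCell
  simp [List.getD_eq_getElem?_getD, List.getElem?_eq_getElem, hr, hf,
        List.getElem?_eq_getElem hr]

theorem pvGrid0_cell (r f : Nat) (hr : r < 8) (hf : f < 8) : pvGetCell pvGrid0 r f = "0" := by
  interval_cases r <;> interval_cases f <;> rfl

theorem pvGrid_eq (n : Int) :
    (PySem.List.enumerate
        (PySem.Chars.zfill ((PySem.Int.toBinChars0b (PySem.Int.band n 0xFFFFFFFFFFFFFFFF)).drop 2) 64) 0).foldl
      pvStep pvGrid0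
    = (List.range 8).map (fun rank =>
        (List.range 8).map (fun file =>
          if PySem.Int.band (n >>> (56 - 8 * rank + file : Nat)) 1 ≠ 0 then "1" else "0")) := by
  have hN : (18446744073709551616 : Int) = 2 ^ 64 := by norm_num
  have hmask := pvBand_mask n
  have hnonneg : 0 ≤ n % 18446744073709551616 := Int.emod_nonneg n (by norm_num)
  have hlt : n % 18446744073709551616 < 18446744073709551616 :=
    Int.emod_lt_of_pos n (by norm_num)
  set m : Nat := (n % 18446744073709551616).toNat with hm
  have hmcast : (m : Int) = n % 18446744073709551616 := by omega
  have hm64 : m < 2 ^ 64 := by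
    have : (2:Nat) ^ 64 = 18446744073709551616 := by norm_num
    omega
  -- the binary string is the 64 top-down bits of m
  have hbs : PySem.Chars.zfill ((PySem.Int.toBinChars0b (PySem.Int.band n 0xFFFFFFFFFFFFFFFF)).drop 2) 64
      = (List.range 64).map (fun i => Nat.digitChar (m / 2 ^ (64 - 1 - i) % 2)) := by
    rw [hmask, PySem.Int.toBinChars0b]
    rw [if_neg (by omega)]
    simp only [List.drop_succ_cons, List.drop_zero]
    rw [pvToDigits_two, pvZfill_eq _ (pvRep_chars _), ← hm]
    rw [pvRep_pad 64 m (by norm_num) hm64, pvBitsM_eq_map]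
  rw [hbs]
  set bs := (List.range 64).map (fun i => Nat.digitChar (m / 2 ^ (64 - 1 - i) % 2)) with hbsdef
  have hbslen : bs.length = 64 := by simp [hbsdef]
  have hbsget : ∀ (k : Nat) (hk : k < 64), bs[k]'(by omega) = Nat.digitChar (m / 2 ^ (64 - 1 - k) % 2) := by
    intro k hk; simp [hbsdef]
  have henum : ∀ p ∈ PySem.List.enumerate bs 0, 0 ≤ p.1 ∧ p.1 < 64 := by
    intro p hp
    obtain ⟨k, hk, rfl⟩ := (PySem.List.mem_enumerate_iff bs 0 p).mp hp
    simp only [zero_add]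
    constructor
    · exact_mod_cast Nat.zero_le k
    · exact_mod_cast (by omega : k < 64)
  have hG0len : pvGrid0.length = 8 := by decide
  have hG0row : ∀ row ∈ pvGrid0, row.length = 8 := by decide
  have hshape := pvFold_shape (PySem.List.enumerate bs 0) pvGrid0 hG0len hG0row henum
  -- the key per-bit fact
  have hbit : ∀ (K : Nat), K < 64 →
      ((Nat.digitChar (m / 2 ^ K % 2) = '1') ↔ PySem.Int.band (n >>> K) 1 ≠ 0) := by
    intro K hK
    rw [pvShift_bit n K hK, ← hmcast]
    have hc : ((m : Int) / 2 ^ K) % 2 = ((m / 2 ^ K % 2 : Nat) : Int) := by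
      push_cast
      rfl
    rw [hc]
    rcases Nat.mod_two_eq_zero_or_one (m / 2 ^ K) with h | h <;> rw [h] <;>
      simp <;> decide
  apply List.ext_getElem
  · rw [hshape.1]; simp
  · intro r hrA hrB
    have hr8 : r < 8 := by omega
    apply List.ext_getElem
    · rw [hshape.2 _ (List.getElem_mem hrA)]
      simp [hr8]
    · intro f hfA hfB
      have hf8 : f < 8 := by
        have := hshape.2 _ (List.getElem_mem hrA)
        omega
      rw [pvGetElem_eq_getCell _ r f hrA hfA]
      rw [pvFold_cell (PySem.List.enumerate bs 0) pvGrid0 r f hr8 hf8 hG0len hG0row henum]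
      rw [pvGrid0_cell r f hr8 hf8]
      have hKlt : 56 - 8 * r + f < 64 := by omega
      have hany : (PySem.List.enumerate bs 0).any
            (fun p => p.2 == '1' && (PySem.Int.floordiv p.1 8).toNat == r
              && (7 - PySem.Int.mod p.1 8).toNat == f)
          = (Nat.digitChar (m / 2 ^ (56 - 8 * r + f) % 2) == '1') := by
        rw [Bool.eq_iff_iff, List.any_eq_true]
        constructor
        · rintro ⟨p, hp, hpred⟩
          obtain ⟨k, hk, rfl⟩ := (PySem.List.mem_enumerate_iff bs 0 p).mp hp
          rw [hbslen] at hk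
          simp only [zero_add, Bool.and_eq_true, beq_iff_eq] at hpred
          obtain ⟨⟨hc1, hc2⟩, hc3⟩ := hpred
          rw [PySem.Int.floordiv_eq_ediv_of_pos (by norm_num)] at hc2
          rw [PySem.Int.mod_eq_emod_of_pos (by norm_num)] at hc3
          have hkval : k = 8 * r + 7 - f := by omega
          have hexp : 64 - 1 - k = 56 - 8 * r + f := by omega
          rw [hbsget k hk, hexp] at hc1
          simp [hc1]
        · intro hdig
          simp only [beq_iff_eq] at hdig
          refine ⟨(((8 * r + 7 - f : Nat) : Int), bs[(8 * r + 7 - f : Nat)]'(by omega)), ?_, ?_⟩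
          · rw [PySem.List.mem_enumerate_iff]
            exact ⟨8 * r + 7 - f, by omega, by simp⟩
          · simp only [Bool.and_eq_true, beq_iff_eq]
            refine ⟨⟨?_, ?_⟩, ?_⟩
            · rw [hbsget _ (by omega)]
              have hexp : 64 - 1 - (8 * r + 7 - f) = 56 - 8 * r + f := by omega
              rw [hexp]; exact hdig
            · rw [PySem.Int.floordiv_eq_ediv_of_pos (by norm_num)]
              omega
            · rw [PySem.Int.mod_eq_emod_of_pos (by norm_num)]
              omega
      rw [hany]
      simp only [List.getElem_map, List.getElem_range]
      by_cases hd : Nat.digitChar (m / 2 ^ (56 - 8 * r + f) % 2) = '1'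
      · rw [if_pos (by simp [hd])]
        rw [if_pos ((hbit _ hKlt).mp hd)]
      · rw [if_neg (by simp [hd])]
        rw [if_neg (fun hcon => hd ((hbit _ hKlt).mpr hcon))]

-- ===== VERDICT (by name: the statement is the Claim_ definition above) =====
theorem print_chessboard_from_number_spec : Claim_equal_print_chessboard_from_number := by
  intro number base _
  unfold Spec_print_chessboard_from_number
  unfold print_chessboard_from_number print_chessboard_from_number_alt
  cases h : PySem.Int.ofStrBase? number base with
  | none => decide
  | some n0 => exact pvGrid_eq _
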